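-- pv_equiv track=rewrite | github.com/jlescher/adventofcode | 2016/day_09_explosives_in_cyberspace/s.py | decompress_p1
-- ===== SOURCE A (Python) =====
-- from collections import deque
--
-- READ_UNTIL_MARKER = 0
--
-- PARSE_MARKER = 1
--
-- DECOMPRESS = 2
--
-- def decompress_p1(stream):
--     dec_stream = ''
--     state = deque([READ_UNTIL_MARKER, PARSE_MARKER, DECOMPRESS])
--     ix = 0
--     while ix < len(stream):
--         if state[0] == READ_UNTIL_MARKER:
--             try:
--                 new_ix = stream.index('(', ix)
--             except ValueError:
--                 new_ix = len(stream)
--             dec_stream += stream[ix:new_ix]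
--             ix = new_ix + 1
--             state.rotate(-1)
--         elif state[0] == PARSE_MARKER:
--             new_ix = stream.index(')', ix)
--             pat_len, repeat = tuple(map(int, stream[ix:new_ix].split('x')))
--             ix = new_ix + 1
--             state.rotate(-1)
--         elif state[0] == DECOMPRESS:
--             pat = stream[ix:ix+pat_len]
--             dec_stream += pat*repeat
--             ix += pat_len
--             state.rotate(-1)
--         else:
--             raise(Exception('Should not land here'))
--     return dec_stream
-- ===== SOURCE B (Python) =====
-- def decompress_p1(stream):
--     p = stream.find('(')
--     if p == -1:
--         return stream
--     q = stream.index(')', p + 1)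
--     pat_len, repeat = map(int, stream[p + 1:q].split('x'))
--     tail = stream[q + 1:]
--     return stream[:p] + tail[:pat_len] * repeat + decompress_p1(tail[pat_len:])
-- ===== Notes on version B (the rewrite author's own statement) =====
-- stated objective: simpler
-- what changed: Replaced the iterative three-state rotating-deque machine and its cursor/state variables by a short recursive decomposition: emit the literal up to the first marker, expand that one marker, and recurse on the remaining suffix of the string.
-- outside the precondition, e.g. on decompress_p1('ab('): A returns 'ab', B raises ValueError; on decompress_p1('(-1x2)ab'): A returns ')ab', B returns 'aab'; on decompress_p1('32(-9x1)'): A returns '32', B returns '32'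
import Mathlib
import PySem

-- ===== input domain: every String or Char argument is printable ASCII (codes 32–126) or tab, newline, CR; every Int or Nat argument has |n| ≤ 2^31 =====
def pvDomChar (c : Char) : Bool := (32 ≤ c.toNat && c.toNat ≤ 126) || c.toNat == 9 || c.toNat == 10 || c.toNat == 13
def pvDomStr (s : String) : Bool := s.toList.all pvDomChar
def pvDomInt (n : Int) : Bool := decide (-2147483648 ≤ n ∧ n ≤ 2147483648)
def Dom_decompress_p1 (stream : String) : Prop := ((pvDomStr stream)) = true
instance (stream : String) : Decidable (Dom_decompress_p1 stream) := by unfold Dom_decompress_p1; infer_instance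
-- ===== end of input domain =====

-- B replaces A's iterative three-state rotating-deque machine by a recursive decomposition:
-- literal, one marker expansion, recurse on the remaining suffix (objective: simpler).
-- Return value only; no mutation.

-- shared transliteration of the identical marker-parsing line of both sources:
-- "pat_len, repeat = map(int, <slice>.split('x'))" — none = ValueError
def pvParseMarker (s : List Char) (a b : Int) : Option (Int × Int) :=
  match (PySem.Chars.splitOn (PySem.Chars.slice s (some a) (some b)) ['x']).mapM PySem.Int.ofChars? with
  | some [L, R] => some (L, R)
  | _ => none

-- ===== PORT A =====
-- A's while loop; state 0 = READ_UNTIL_MARKER, 1 = PARSE_MARKER, 2 = DECOMPRESS (the deque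
-- rotation is the 0→1→2→0 cycle).  The fuel only makes the recursion structural (A can loop
-- forever on negative-length markers; Pre_ excludes those, and the proof shows the given fuel
-- is never exhausted under Pre_).  On the branches where Python raises ValueError (unclosed
-- marker / bad int) the port returns the current dec_stream; Pre_ excludes those inputs.
def pvALoop (s : List Char) : Nat → Nat → Int → Int → Int → List Char → List Char
  | 0, _, _, _, _, dec => dec
  | fuel + 1, state, ix, patLen, rep, dec =>
    if ix < (s.length : Int) then
      if state = 0 then
        let f := PySem.Chars.findFrom s ['('] ix none
        let newIx : Int := if f = -1 then (s.length : Int) else f   -- try/except ValueError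
        pvALoop s fuel 1 (newIx + 1) patLen rep (dec ++ PySem.Chars.slice s (some ix) (some newIx))
      else if state = 1 then
        let q := PySem.Chars.findFrom s [')'] ix none
        if q = -1 then dec                                          -- ValueError (outside Pre_)
        else match pvParseMarker s ix q with
          | some (L, R) => pvALoop s fuel 2 (q + 1) L R dec
          | none => dec                                             -- ValueError (outside Pre_)
      else
        let pat := PySem.Chars.slice s (some ix) (some (ix + patLen))
        pvALoop s fuel 0 (ix + patLen) patLen rep (dec ++ PySem.List.pyRepeat pat rep)
    else dec

def decompress_p1 (stream : String) : String :=
  String.ofList (pvALoop stream.toList (3 * stream.toList.length + 3) 0 0 0 0 [])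

-- ===== PORT B =====
-- B (Source B): recursive — literal up to the first '(', one marker expansion, recurse on the
-- suffix after the pattern.  The fuel only makes the recursion structural (each recursive
-- call is on a shorter suffix; the proof shows length+1 fuel is never exhausted under Pre_).
-- Where Python raises ValueError (unclosed marker / bad int) the port returns the literal
-- part read so far; Pre_ excludes those inputs.
def pvBRec : Nat → List Char → List Char
  | 0, s => s
  | fuel + 1, s =>
    let p := PySem.Chars.find s ['(']
    if p = -1 then s
    else
      let q := PySem.Chars.findFrom s [')'] (p + 1) none
      if q = -1 then PySem.Chars.slice s none (some p)              -- ValueError (outside Pre_)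
      else match pvParseMarker s (p + 1) q with
        | some (L, R) =>
          let tail := PySem.Chars.slice s (some (q + 1)) none
          PySem.Chars.slice s none (some p)
            ++ PySem.List.pyRepeat (PySem.Chars.slice tail none (some L)) R
            ++ pvBRec fuel (PySem.Chars.slice tail (some L) none)
        | none => PySem.Chars.slice s none (some p)                 -- ValueError (outside Pre_)

def decompress_p1_alt (stream : String) : String :=
  String.ofList (pvBRec (stream.toList.length + 1) stream.toList)

-- ===== PRECONDITION & SPEC =====
-- Pre_ excludes exactly the streams whose scan hits an unclosed or malformed marker — there A
-- raises ValueError, except when the lone '(' is the very last character, where A's loop-bound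
-- check silently drops it while B's stream.index(')') naturally raises ValueError — and the
-- streams with a marker declaring a negative pattern length, on which A's cursor moves
-- backwards and A diverges or returns an accidental re-read of earlier text.
-- pvWf is the well-formed-marker grammar, scanned left to right; the gas argument is the
-- closed bound length+1 (one unit per marker, each marker consumes ≥ 2 characters), it only
-- makes the recursion structural and is proved never to run out (pvMain's induction).
def pvWf (s : List Char) : Nat → Nat → Bool
  | 0, _ => false
  | gas + 1, ix =>
    if s.length < ix then true
    else if PySem.Chars.findFrom s ['('] (ix : Int) none = -1 then true
    else if PySem.Chars.findFrom s [')'] (PySem.Chars.findFrom s ['('] (ix : Int) none + 1) none = -1 then false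
    else
      match pvParseMarker s (PySem.Chars.findFrom s ['('] (ix : Int) none + 1)
          (PySem.Chars.findFrom s [')'] (PySem.Chars.findFrom s ['('] (ix : Int) none + 1) none) with
      | none => false
      | some (L, _) =>
        if L < 0 then false
        else if s.length < (PySem.Chars.findFrom s [')'] (PySem.Chars.findFrom s ['('] (ix : Int) none + 1) none + 1 + L).toNat then true
        else pvWf s gas ((PySem.Chars.findFrom s [')'] (PySem.Chars.findFrom s ['('] (ix : Int) none + 1) none + 1 + L).toNat)

def Pre_decompress_p1 (stream : String) : Prop := pvWf stream.toList (stream.toList.length + 1) 0 = true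
instance (stream : String) : Decidable (Pre_decompress_p1 stream) := by unfold Pre_decompress_p1; infer_instance

def pvWitness_decompress_p1 : String := "X(8x2)(3x3)ABCY"

def Spec_decompress_p1 (stream : String) (out : String) : Prop := out = decompress_p1_alt stream
instance (stream : String) (out : String) : Decidable (Spec_decompress_p1 stream out) := by unfold Spec_decompress_p1; infer_instance

-- ===== CLAIM (what is proved, stated in full; the proofs are below) =====
def Claim_equal_decompress_p1 : Prop := ∀ (stream : String), Dom_decompress_p1 stream → Pre_decompress_p1 stream → Spec_decompress_p1 stream (decompress_p1 stream)

-- ===== LEMMAS AND PROOFS =====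
theorem pvFindFrom_bounds (s sub : List Char) (k : Nat) (hk : k ≤ s.length) (hsub : sub ≠ [])
    (h : PySem.Chars.findFrom s sub (k : Int) none ≠ -1) :
    (k : Int) ≤ PySem.Chars.findFrom s sub (k : Int) none ∧
      (PySem.Chars.findFrom s sub (k : Int) none).toNat < s.length := by
  obtain ⟨h1, h2, -⟩ := PySem.Chars.findFrom_natCast_spec s sub k hk h
  refine ⟨h1, ?_⟩
  have hlen := h2.length_le
  simp [List.length_drop] at hlen
  rcases sub with _ | ⟨c, t⟩
  · exact absurd rfl hsub
  · simp at hlen; omega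

-- translate a findFrom fact on s into a find fact on the suffix s.drop ix
theorem pvFind_drop_neg_one (s sub : List Char) (ix : Nat) (hk : ix ≤ s.length) :
    PySem.Chars.findFrom s sub (ix : Int) none = -1 ↔ PySem.Chars.find (s.drop ix) sub = -1 := by
  rw [PySem.Chars.findFrom_natCast s sub ix hk]
  constructor
  · intro h
    by_contra hne
    rw [if_neg hne] at h
    have := PySem.Chars.neg_one_le_find (s.drop ix) sub
    omega
  · intro h; rw [if_pos h]

theorem pvFind_drop_eq (s sub : List Char) (ix pt : Nat) (hk : ix ≤ s.length) (hge : ix ≤ pt)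
    (h : PySem.Chars.findFrom s sub (ix : Int) none = (pt : Int)) :
    PySem.Chars.find (s.drop ix) sub = ((pt - ix : Nat) : Int) := by
  rw [PySem.Chars.findFrom_natCast s sub ix hk] at h
  by_cases hne : PySem.Chars.find (s.drop ix) sub = -1
  · rw [if_pos hne] at h; omega
  · rw [if_neg hne] at h
    have := PySem.Chars.neg_one_le_find (s.drop ix) sub
    omega

-- pvParseMarker only reads the slice, which is the same on the suffix
theorem pvParseMarker_drop (s : List Char) (ix a b : Nat) :
    pvParseMarker (s.drop ix) (a : Int) (b : Int) =
      pvParseMarker s ((ix + a : Nat) : Int) ((ix + b : Nat) : Int) := by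
  unfold pvParseMarker
  have h : PySem.List.slice (s.drop ix) (some (a : Int)) (some (b : Int)) =
      PySem.List.slice s (some ((ix + a : Nat) : Int)) (some ((ix + b : Nat) : Int)) := by
    rw [PySem.List.slice_natCast, PySem.List.slice_natCast, List.drop_drop]
    congr 1
    omega
  rw [PySem.Chars.slice_eq_listSlice, PySem.Chars.slice_eq_listSlice, h]

-- accumulator factoring
theorem pvALoop_append (s : List Char) : ∀ (fuel state : Nat) (ix pl rp : Int) (d : List Char),
    pvALoop s fuel state ix pl rp d = d ++ pvALoop s fuel state ix pl rp [] := by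
  intro fuel
  induction fuel with
  | zero => intro state ix pl rp d; simp [pvALoop]
  | succ n ih =>
    intro state ix pl rp d
    simp only [pvALoop]
    split_ifs <;> try rfl
    all_goals try (split <;> try rfl)
    all_goals try ((conv_lhs => rw [ih]); (conv_rhs => rw [ih]); try simp)
    all_goals try simp
    all_goals exact ih _ _ _ _ d

-- past the end A's loop is finished; B's recursion returns [] on the empty suffix
theorem pvALoop_done (s : List Char) (fuel state : Nat) (ix pl rp : Int) (d : List Char)
    (h : (s.length : Int) ≤ ix) : pvALoop s fuel state ix pl rp d = d := by
  cases fuel <;> simp [pvALoop, not_lt.mpr h]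

-- single-step evaluation lemmas for A's loop and B's recursion
theorem pvA_step0 (s : List Char) (m : Nat) (ix pl rp : Int) (d : List Char)
    (hix : ix < (s.length : Int)) :
    pvALoop s (m + 1) 0 ix pl rp d =
      pvALoop s m 1 ((if PySem.Chars.findFrom s ['('] ix none = -1 then (s.length : Int)
          else PySem.Chars.findFrom s ['('] ix none) + 1) pl rp
        (d ++ PySem.Chars.slice s (some ix)
          (some (if PySem.Chars.findFrom s ['('] ix none = -1 then (s.length : Int)
            else PySem.Chars.findFrom s ['('] ix none))) := by
  simp only [pvALoop, if_pos hix]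
  rfl

theorem pvA_step1 (s : List Char) (m : Nat) (ix pl rp : Int) (d : List Char) (L R : Int)
    (hix : ix < (s.length : Int))
    (hq : PySem.Chars.findFrom s [')'] ix none ≠ -1)
    (hm : pvParseMarker s ix (PySem.Chars.findFrom s [')'] ix none) = some (L, R)) :
    pvALoop s (m + 1) 1 ix pl rp d =
      pvALoop s m 2 (PySem.Chars.findFrom s [')'] ix none + 1) L R d := by
  simp only [pvALoop, if_pos hix, if_neg hq, hm]
  rfl

theorem pvA_step2 (s : List Char) (m : Nat) (ix pl rp : Int) (d : List Char)
    (hix : ix < (s.length : Int)) :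
    pvALoop s (m + 1) 2 ix pl rp d =
      pvALoop s m 0 (ix + pl) pl rp
        (d ++ PySem.List.pyRepeat (PySem.Chars.slice s (some ix) (some (ix + pl))) rp) := by
  simp only [pvALoop, if_pos hix]
  rfl

theorem pvB_last (t : List Char) (m : Nat)
    (hp : PySem.Chars.find t ['('] = -1) :
    pvBRec (m + 1) t = t := by
  simp only [pvBRec, hp]
  rfl

theorem pvBRec_nil (fuel : Nat) : pvBRec fuel [] = [] := by
  cases fuel with
  | zero => rfl
  | succ n => exact pvB_last [] n (by decide)

theorem pvB_step (t : List Char) (m : Nat) (L R : Int)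
    (hp : PySem.Chars.find t ['('] ≠ -1)
    (hq : PySem.Chars.findFrom t [')'] (PySem.Chars.find t ['('] + 1) none ≠ -1)
    (hm : pvParseMarker t (PySem.Chars.find t ['('] + 1)
        (PySem.Chars.findFrom t [')'] (PySem.Chars.find t ['('] + 1) none) = some (L, R)) :
    pvBRec (m + 1) t =
      PySem.Chars.slice t none (some (PySem.Chars.find t ['('])) ++
        PySem.List.pyRepeat (PySem.Chars.slice
          (PySem.Chars.slice t (some (PySem.Chars.findFrom t [')'] (PySem.Chars.find t ['('] + 1) none + 1)) none)
          none (some L)) R ++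
        pvBRec m (PySem.Chars.slice
          (PySem.Chars.slice t (some (PySem.Chars.findFrom t [')'] (PySem.Chars.find t ['('] + 1) none + 1)) none)
          (some L) none) := by
  simp only [pvBRec, if_neg hp, if_neg hq, hm]

theorem pvMain (s : List Char) : ∀ (g ix : Nat),
    pvWf s g ix = true →
    ∀ (fa fb : Nat) (pl rp : Int),
      3 * (s.length + 1 - ix) ≤ fa → s.length + 1 - ix ≤ fb →
      pvALoop s fa 0 (ix : Int) pl rp [] = pvBRec fb (s.drop ix) := by
  intro g
  induction g with
  | zero => intro ix hwf; exact absurd hwf (by simp [pvWf])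
  | succ g ih =>
    intro ix hwf fa fb pl rp hfa hfb
    by_cases hin : s.length ≤ ix
    · have hix : (s.length : Int) ≤ (ix : Int) := by exact_mod_cast hin
      rw [pvALoop_done s fa 0 _ pl rp [] hix, List.drop_eq_nil_of_le hin, pvBRec_nil]
    · have hixn : ix < s.length := by omega
      have hixI : (ix : Int) < (s.length : Int) := by exact_mod_cast hixn
      rw [pvWf] at hwf
      rw [if_neg (by omega : ¬ s.length < ix)] at hwf
      obtain ⟨fb', rfl⟩ : ∃ m, fb = m + 1 := ⟨fb - 1, by omega⟩
      by_cases hp : PySem.Chars.findFrom s ['('] (ix : Int) none = -1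
      · -- no further marker: A emits the rest then stops; B returns the whole suffix
        obtain ⟨fa', rfl⟩ : ∃ m, fa = m + 1 := ⟨fa - 1, by omega⟩
        have hpB : PySem.Chars.find (s.drop ix) ['('] = -1 :=
          (pvFind_drop_neg_one s ['('] ix (by omega)).mp hp
        rw [pvA_step0 s fa' (ix : Int) pl rp [] hixI, if_pos hp,
          pvALoop_done s fa' 1 _ pl rp _ (by omega), pvB_last _ fb' hpB]
        simp only [List.nil_append, PySem.Chars.slice_eq_listSlice]
        rw [PySem.List.slice_natCast]
        exact List.take_of_length_le (by simp)
      · -- a marker: A runs READ, PARSE, DECOMPRESS; B expands the block and recurses on the suffix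
        obtain ⟨hp1, hp2⟩ := pvFindFrom_bounds s ['('] ix (by omega) (by simp) hp
        obtain ⟨pt, hpt, hpt1, hpt2⟩ : ∃ pt : Nat,
            PySem.Chars.findFrom s ['('] (ix : Int) none = (pt : Int) ∧ ix ≤ pt ∧ pt < s.length :=
          ⟨(PySem.Chars.findFrom s ['('] (ix : Int) none).toNat, by omega, by omega, hp2⟩
        have hcast : ((pt : Int) + 1) = ((pt + 1 : Nat) : Int) := by push_cast; ring
        rw [if_neg hp, hpt, hcast] at hwf
        have hpB : PySem.Chars.find (s.drop ix) ['('] = ((pt - ix : Nat) : Int) :=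
          pvFind_drop_eq s ['('] ix pt (by omega) hpt1 hpt
        by_cases hq : PySem.Chars.findFrom s [')'] ((pt + 1 : Nat) : Int) none = -1
        · rw [if_pos hq] at hwf; exact absurd hwf (by simp)
        · rw [if_neg hq] at hwf
          obtain ⟨hq1', hq2'⟩ := pvFindFrom_bounds s [')'] (pt + 1) (by omega) (by simp) hq
          obtain ⟨qt, hqt, hqt1, hqt2⟩ : ∃ qt : Nat,
              PySem.Chars.findFrom s [')'] ((pt + 1 : Nat) : Int) none = (qt : Int) ∧
                pt + 1 ≤ qt ∧ qt < s.length :=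
            ⟨(PySem.Chars.findFrom s [')'] ((pt + 1 : Nat) : Int) none).toNat, by omega, by omega, hq2'⟩
          rw [hqt] at hwf
          have hqB : PySem.Chars.findFrom (s.drop ix) [')'] (((pt - ix : Nat) : Int) + 1) none
              = ((qt - ix : Nat) : Int) := by
            have hc : ((pt - ix : Nat) : Int) + 1 = ((pt - ix + 1 : Nat) : Int) := by push_cast; ring
            have hdd : (s.drop ix).drop (pt - ix + 1) = s.drop (pt + 1) := by
              rw [List.drop_drop]; congr 1; omega
            have hfq : PySem.Chars.find (s.drop (pt + 1)) [')'] = ((qt - (pt + 1) : Nat) : Int) :=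
              pvFind_drop_eq s [')'] (pt + 1) qt (by omega) (by omega) hqt
            rw [hc, PySem.Chars.findFrom_natCast _ [')'] (pt - ix + 1)
              (by simp only [List.length_drop]; omega), hdd, hfq, if_neg (by omega)]
            omega
          rcases hm : pvParseMarker s ((pt + 1 : Nat) : Int) (qt : Int) with - | ⟨L, R⟩
          · rw [hm] at hwf; exact absurd hwf (by simp)
          · rw [hm] at hwf
            dsimp only [] at hwf
            by_cases hL : L < 0
            · rw [if_pos hL] at hwf; exact absurd hwf (by simp)
            · rw [if_neg hL] at hwf
              obtain ⟨Ln, hLc⟩ : ∃ Ln : Nat, L = (Ln : Int) := ⟨L.toNat, by omega⟩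
              -- B: the whole block in one recursion step
              have hp' : PySem.Chars.find (s.drop ix) ['('] ≠ -1 := by rw [hpB]; omega
              have hq'' : PySem.Chars.findFrom (s.drop ix) [')']
                  (PySem.Chars.find (s.drop ix) ['('] + 1) none ≠ -1 := by
                rw [hpB, hqB]; omega
              have hm' : pvParseMarker (s.drop ix) (PySem.Chars.find (s.drop ix) ['('] + 1)
                  (PySem.Chars.findFrom (s.drop ix) [')']
                    (PySem.Chars.find (s.drop ix) ['('] + 1) none) = some (L, R) := by
                rw [hpB, hqB]
                have hc : ((pt - ix : Nat) : Int) + 1 = ((pt - ix + 1 : Nat) : Int) := by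
                  push_cast; ring
                rw [hc, pvParseMarker_drop s ix (pt - ix + 1) (qt - ix),
                  show ix + (pt - ix + 1) = pt + 1 from by omega,
                  show ix + (qt - ix) = qt from by omega]
                exact hm
              have hstep := pvB_step (s.drop ix) fb' L R hp' hq'' hm'
              rw [hpB, hqB] at hstep
              have htail : PySem.Chars.slice (s.drop ix) (some (((qt - ix : Nat) : Int) + 1)) none
                  = s.drop (qt + 1) := by
                have hc : ((qt - ix : Nat) : Int) + 1 = ((qt - ix + 1 : Nat) : Int) := by
                  push_cast; ring
                rw [PySem.Chars.slice_eq_listSlice, hc, PySem.List.slice_from_natCast,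
                  List.drop_drop]
                congr 1; omega
              rw [htail] at hstep
              -- the literal parts agree
              have hlit : PySem.Chars.slice s (some (ix : Int)) (some (pt : Int)) =
                  PySem.Chars.slice (s.drop ix) none (some ((pt - ix : Nat) : Int)) := by
                rw [PySem.Chars.slice_eq_listSlice, PySem.Chars.slice_eq_listSlice,
                  PySem.List.slice_natCast, PySem.List.slice_to_natCast]
              -- the expanded patterns agree
              have hpat : PySem.Chars.slice s (some ((qt : Int) + 1)) (some ((qt : Int) + 1 + L)) =
                  PySem.Chars.slice (s.drop (qt + 1)) none (some L) := by
                have hc1 : (qt : Int) + 1 = ((qt + 1 : Nat) : Int) := by push_cast; ring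
                have hc2 : (qt : Int) + 1 + L = ((qt + 1 + Ln : Nat) : Int) := by
                  rw [hLc]; push_cast; ring
                rw [PySem.Chars.slice_eq_listSlice, PySem.Chars.slice_eq_listSlice,
                  hc2, hc1, hLc, PySem.List.slice_natCast, PySem.List.slice_to_natCast]
                congr 1
                omega
              -- A: READ
              obtain ⟨m', rfl⟩ : ∃ t, fa = t + 1 + 3 := ⟨fa - 4, by omega⟩
              rw [pvA_step0 s (m' + 3) (ix : Int) pl rp [] hixI, if_neg hp, hpt, hcast]
              -- A: PARSE
              have hix2 : ((pt + 1 : Nat) : Int) < (s.length : Int) :=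
                by exact_mod_cast (by omega : pt + 1 < s.length)
              have hmA : pvParseMarker s ((pt + 1 : Nat) : Int)
                  (PySem.Chars.findFrom s [')'] ((pt + 1 : Nat) : Int) none) = some (L, R) := by
                rw [hqt]; exact hm
              rw [pvA_step1 s (m' + 2) ((pt + 1 : Nat) : Int) pl rp _ L R hix2 hq hmA, hqt]
              rw [hstep]
              by_cases hend : qt + 1 < s.length
              · -- A: DECOMPRESS, then both sides continue after the pattern
                rw [pvA_step2 s (m' + 1) ((qt : Int) + 1) L R _
                  (by exact_mod_cast (by omega : qt + 1 < s.length))]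
                rw [pvALoop_append]
                simp only [List.nil_append, List.append_assoc]
                rw [hlit, hpat]
                congr 2
                -- the continuations agree
                have hrecarg : PySem.Chars.slice (s.drop (qt + 1)) (some L) none =
                    s.drop (qt + 1 + Ln) := by
                  rw [PySem.Chars.slice_eq_listSlice, hLc, PySem.List.slice_from_natCast,
                    List.drop_drop]
                rw [hrecarg]
                have hc3 : (qt : Int) + 1 + L = ((qt + 1 + Ln : Nat) : Int) := by
                  rw [hLc]; push_cast; ring
                rw [hc3]
                by_cases hbig : s.length < ((qt : Int) + 1 + L).toNat
                · rw [pvALoop_done s (m' + 1) 0 _ L R [] (by push_cast; omega),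
                    List.drop_eq_nil_of_le (by omega), pvBRec_nil]
                · rw [if_neg hbig] at hwf
                  have harg : ((qt : Int) + 1 + L).toNat = qt + 1 + Ln := by omega
                  rw [harg] at hwf
                  exact ih (qt + 1 + Ln) hwf (m' + 1) fb' L R (by omega) (by omega)
              · -- the marker's ')' is the last character: A's loop test stops before DECOMPRESS;
                -- B appends an empty pattern and recurses on the empty suffix
                rw [pvALoop_done s (m' + 2) 2 _ L R _
                  (by omega : (s.length : Int) ≤ (qt : Int) + 1)]
                have hnil : s.drop (qt + 1) = ([] : List Char) :=
                  List.drop_eq_nil_of_le (by omega)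
                rw [hnil] at hstep ⊢
                have hpatnil : PySem.Chars.slice ([] : List Char) none (some L) = [] := by
                  simp [PySem.Chars.slice_eq_listSlice, PySem.List.slice]
                have hrecnil : PySem.Chars.slice ([] : List Char) (some L) none = [] := by
                  simp [PySem.Chars.slice_eq_listSlice, PySem.List.slice]
                rw [hpatnil, hrecnil, pvBRec_nil]
                simp only [List.nil_append, List.append_nil]
                rw [hlit]
                simp [PySem.List.pyRepeat]

-- ===== VERDICT (by name: the statement is the Claim_ definition above) =====
theorem decompress_p1_spec : Claim_equal_decompress_p1 := by
  intro stream _ hpre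
  unfold Spec_decompress_p1 decompress_p1 decompress_p1_alt
  congr 1
  have := pvMain stream.toList (stream.toList.length + 1) 0 hpre
    (3 * stream.toList.length + 3) (stream.toList.length + 1) 0 0 (by omega) (by omega)
  simpa using this
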